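-- pv_equiv track=rewrite | github.com/anton-sturluson/project-minerva | src/harness/morning_brief.py | relationship_for_security
-- ===== SOURCE A (Python) =====
-- from typing import Any
--
-- def relationship_for_security(
--     security_id: str,
--     universe: list[dict[str, Any]],
--     adjacency_map: list[dict[str, Any]],
-- ) -> str:
--     """Resolve monitored vs adjacent vs market relationship tags."""
--     monitored_ids = {str(item.get("security_id", "")) for item in universe}
--     if security_id in monitored_ids:
--         return "monitored"
--     adjacent_ids = {str(item.get("adjacent", "")) for item in adjacency_map}
--     if security_id in adjacent_ids:
--         return "adjacent"
--     return "market"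
-- ===== SOURCE B (Python) =====
-- from typing import Any
--
-- def relationship_for_security(
--     security_id: str,
--     universe: list[dict[str, Any]],
--     adjacency_map: list[dict[str, Any]],
-- ) -> str:
--     """Single pass over one tagged stream, keeping the best (max) relationship rank."""
--     stream = [(2, "security_id", item) for item in universe] + [
--         (1, "adjacent", item) for item in adjacency_map
--     ]
--     best = 0
--     for rank, key, item in stream:
--         if str(item.get(key, "")) == security_id:
--             best = max(best, rank)
--     return "monitored" if best == 2 else ("adjacent" if best == 1 else "market")
-- ===== Notes on version B (the rewrite author's own statement) =====
-- stated objective: alternative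
-- what changed: Instead of building two sets and doing prioritized membership tests with early returns, B makes one fold over a single tagged stream (universe items ranked 2, adjacency items ranked 1), keeps the maximum matching rank in a numeric accumulator, and decodes that rank to a label at the end.
import Mathlib
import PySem

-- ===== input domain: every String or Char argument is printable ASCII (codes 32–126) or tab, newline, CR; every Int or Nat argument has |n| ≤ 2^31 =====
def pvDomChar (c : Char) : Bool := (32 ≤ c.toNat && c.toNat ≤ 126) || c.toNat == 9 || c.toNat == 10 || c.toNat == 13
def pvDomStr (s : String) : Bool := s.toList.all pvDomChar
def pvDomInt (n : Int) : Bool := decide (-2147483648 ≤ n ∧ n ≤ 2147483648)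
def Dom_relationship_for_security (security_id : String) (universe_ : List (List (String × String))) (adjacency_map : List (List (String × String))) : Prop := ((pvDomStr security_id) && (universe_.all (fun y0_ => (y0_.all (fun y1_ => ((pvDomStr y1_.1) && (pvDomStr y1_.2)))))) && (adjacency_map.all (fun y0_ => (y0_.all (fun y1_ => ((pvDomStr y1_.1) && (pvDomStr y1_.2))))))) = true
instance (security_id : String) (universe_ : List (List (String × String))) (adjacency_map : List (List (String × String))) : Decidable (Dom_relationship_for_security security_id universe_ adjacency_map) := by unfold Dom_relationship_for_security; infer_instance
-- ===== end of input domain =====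

-- ===== PORT A =====
-- B replaces the two sets + prioritized membership tests by one fold over a single
-- tagged stream keeping the maximum matching rank (alternative decomposition, same cost).

-- str(item.get(key, "")) for a str-valued dict: lookup with default "" (str() is identity on str)
def pvItemGet (key : String) (item : List (String × String)) : String :=
  (PySem.Dict.ofList item).getD key ""

def relationship_for_security (security_id : String) (universe_ : List (List (String × String))) (adjacency_map : List (List (String × String))) : String :=
  let monitored_ids : PySem.Set String :=
    PySem.Set.ofList (universe_.map (fun item => pvItemGet "security_id" item))
  if PySem.Set.contains monitored_ids security_id then "monitored"
  else
    let adjacent_ids : PySem.Set String :=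
      PySem.Set.ofList (adjacency_map.map (fun item => pvItemGet "adjacent" item))
    if PySem.Set.contains adjacent_ids security_id then "adjacent"
    else "market"

-- ===== PORT B =====
def relationship_for_security_alt (security_id : String) (universe_ : List (List (String × String))) (adjacency_map : List (List (String × String))) : String :=
  let stream : List (Nat × String × List (String × String)) :=
    (universe_.map (fun item => (2, "security_id", item)))
      ++ (adjacency_map.map (fun item => (1, "adjacent", item)))
  let best : Nat :=
    stream.foldl (fun best rki =>
      if pvItemGet rki.2.1 rki.2.2 == security_id then max best rki.1 else best) 0
  if best == 2 then "monitored" else if best == 1 then "adjacent" else "market"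

-- ===== PRECONDITION & SPEC =====
def Spec_relationship_for_security (security_id : String) (universe_ : List (List (String × String))) (adjacency_map : List (List (String × String))) (out : String) : Prop := out = relationship_for_security_alt security_id universe_ adjacency_map
instance (security_id : String) (universe_ : List (List (String × String))) (adjacency_map : List (List (String × String))) (out : String) : Decidable (Spec_relationship_for_security security_id universe_ adjacency_map out) := by unfold Spec_relationship_for_security; infer_instance

-- ===== CLAIM (what is proved, stated in full; the proofs are below) =====
def Claim_equal_relationship_for_security : Prop := ∀ (security_id : String) (universe_ : List (List (String × String))) (adjacency_map : List (List (String × String))), Dom_relationship_for_security security_id universe_ adjacency_map → Spec_relationship_for_security security_id universe_ adjacency_map (relationship_for_security security_id universe_ adjacency_map)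

-- ===== LEMMAS AND PROOFS =====

-- max-rank fold over one list with a fixed rank r: result is max b0 r on a match, b0 otherwise
theorem pv_fold_max {α : Type} (l : List α) (f : α → String) (r b0 : Nat) (sid : String) :
    (l.foldl (fun b a => if f a == sid then max b r else b) b0)
      = if sid ∈ l.map f then max b0 r else b0 := by
  induction l generalizing b0 with
  | nil => simp
  | cons a l ih =>
    simp only [List.foldl_cons, ih, List.map_cons, List.mem_cons]
    by_cases h2 : f a == sid
    · have hsid : sid = f a := (beq_iff_eq.mp h2).symm
      by_cases h1 : sid ∈ l.map f <;>
        simp [h1, h2, hsid, Nat.max_comm, Nat.max_assoc, Nat.max_self]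
    · have hsid : ¬ sid = f a := fun h => h2 (beq_iff_eq.mpr h.symm)
      by_cases h1 : sid ∈ l.map f <;> simp [h1, h2, hsid]

-- ===== VERDICT (by name: the statement is the Claim_ definition above) =====
theorem relationship_for_security_spec : Claim_equal_relationship_for_security := by
  intro sid u adj _
  show _ = _
  unfold relationship_for_security relationship_for_security_alt
  simp only [List.foldl_append, List.foldl_map, pv_fold_max,
    PySem.Set.contains_eq_listContains, List.contains_eq_mem,
    PySem.Set.mem_ofList, decide_eq_true_eq]
  by_cases h1 : sid ∈ u.map (fun item => pvItemGet "security_id" item) <;>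
    by_cases h2 : sid ∈ adj.map (fun item => pvItemGet "adjacent" item) <;>
      simp [h1, h2]
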